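-- pv_equiv track=rewrite | github.com/nami4mo/competitive-programming-problems | practice/past/past5/past202012_e.py | check
-- ===== SOURCE A (Python) =====
-- def check(sl,tll):
--     h=len(sl)
--     w=len(sl[0])
--     th=len(tll)
--     tw=len(tll[0])
--     for y in range(h-th+1):
--         for x in range(w-tw+1):
--             res=True
--             for i in range(th):
--                 for j in range(tw):
--                     if tll[i][j]=='#' and sl[y+i][x+j]=='#':
--                         res=False
--             if res: return True
--     return False
-- ===== SOURCE B (Python) =====
-- def check(sl, tll):
--     H = len(sl) - len(tll)
--     W = len(sl[0]) - len(tll[0])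
--     blocked = {(gy - ty, gx - tx)
--                for gy, grow in enumerate(sl)
--                for gx, ch in enumerate(grow) if ch == '#'
--                for ty, trow in enumerate(tll)
--                for tx, tch in enumerate(trow) if tch == '#'
--                if 0 <= gy - ty <= H and 0 <= gx - tx <= W}
--     return len(blocked) < max(0, H + 1) * max(0, W + 1)
-- ===== Notes on version B (the rewrite author's own statement) =====
-- stated objective: alternative
-- what changed: A scans every placement window and every template cell inside it; B never scans windows: it builds the set of blocked placements directly from pairs of '#' cells (grid '#' cross template '#', a sparse cross-correlation) and answers by comparing that set's cardinality with the total number of placement windows.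
-- outside the precondition, e.g. on check(['.', '.#'], ['#', '.#']): A returns True, B returns False; on check(['##', '#'], ['.']): A returns True, B returns True
import Mathlib
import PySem

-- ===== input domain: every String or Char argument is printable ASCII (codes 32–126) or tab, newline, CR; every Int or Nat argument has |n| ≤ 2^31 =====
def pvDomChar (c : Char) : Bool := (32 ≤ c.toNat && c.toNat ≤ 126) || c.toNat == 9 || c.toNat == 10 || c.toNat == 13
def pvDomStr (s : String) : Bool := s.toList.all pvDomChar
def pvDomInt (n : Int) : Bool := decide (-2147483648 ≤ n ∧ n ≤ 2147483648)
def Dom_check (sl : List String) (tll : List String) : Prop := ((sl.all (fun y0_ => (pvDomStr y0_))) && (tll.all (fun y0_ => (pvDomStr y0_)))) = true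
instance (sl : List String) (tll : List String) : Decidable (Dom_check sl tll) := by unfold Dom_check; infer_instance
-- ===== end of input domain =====

-- B replaces A's window scan entirely: it collects the SET of blocked placements from pairs of
-- '#' cells (grid '#' × template '#', sparse cross-correlation) and answers by comparing that
-- set's cardinality with the number of placement windows (alternative algorithm, same worst cost).


-- ===== PORT A =====
-- Literal port of A. Indexing uses pyGetD (defaults never fire inside Pre_, where every
-- accessed index is in range); the early-return double loop over placements is the double `any`.
def check (sl : List String) (tll : List String) : Bool :=
  let slc : List (List Char) := sl.map String.toList
  let tlc : List (List Char) := tll.map String.toList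
  let h : Int := slc.length
  let w : Int := (PySem.List.pyGetD slc 0 []).length
  let th : Int := tlc.length
  let tw : Int := (PySem.List.pyGetD tlc 0 []).length
  (PySem.List.pyRange 0 (h - th + 1) 1).any fun y =>
    (PySem.List.pyRange 0 (w - tw + 1) 1).any fun x =>
      (PySem.List.pyRange 0 th 1).foldl (fun res i =>
        (PySem.List.pyRange 0 tw 1).foldl (fun res j =>
          if PySem.List.pyGetD (PySem.List.pyGetD tlc i []) j ' ' == '#' &&
             PySem.List.pyGetD (PySem.List.pyGetD slc (y + i) []) (x + j) ' ' == '#'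
          then false else res) res) true

-- ===== PORT B =====
-- Port of Source B: the set comprehension over pairs of '#' cells becomes Set.ofList of nested
-- flatMaps over enumerate (PySem.enumerate indexes with Int, like Python's enumerate);
-- the final answer compares the set's size with the window count.
def check_alt (sl : List String) (tll : List String) : Bool :=
  let slc : List (List Char) := sl.map String.toList
  let tlc : List (List Char) := tll.map String.toList
  let H : Int := (slc.length : Int) - (tlc.length : Int)
  let W : Int := ((PySem.List.pyGetD slc 0 []).length : Int) -
                 ((PySem.List.pyGetD tlc 0 []).length : Int)
  let blocked : PySem.Set (Int × Int) := PySem.Set.ofList <|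
    (PySem.List.enumerate slc).flatMap fun gyr =>
      (PySem.List.enumerate gyr.2).flatMap fun gxc =>
        if gxc.2 == '#' then
          (PySem.List.enumerate tlc).flatMap fun tyr =>
            (PySem.List.enumerate tyr.2).flatMap fun txc =>
              if txc.2 == '#' && decide (0 ≤ gyr.1 - tyr.1) && decide (gyr.1 - tyr.1 ≤ H) &&
                 decide (0 ≤ gxc.1 - txc.1) && decide (gxc.1 - txc.1 ≤ W)
              then [(gyr.1 - tyr.1, gxc.1 - txc.1)] else []
        else []
  decide ((blocked.length : Int) < max 0 (H + 1) * max 0 (W + 1))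

-- ===== PRECONDITION & SPEC =====
-- Pre_ excludes empty grid/template lists (A raises IndexError on sl[0]/tll[0]) and ragged
-- inputs that admit at least one placement window, on which A raises IndexError or, when the
-- out-of-range cells happen never to be read, returns a value that is an accident of its scan
-- order.  (If the template is taller or wider than the grid, A's loops never run, so ragged
-- rows are harmless and such inputs stay inside Pre_.)
def Pre_check (sl : List String) (tll : List String) : Prop :=
  sl ≠ [] ∧ tll ≠ [] ∧
  (((∀ s ∈ sl, s.toList.length = (sl.headD "").toList.length) ∧
    (∀ s ∈ tll, s.toList.length = (tll.headD "").toList.length)) ∨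
   sl.length < tll.length ∨
   (sl.headD "").toList.length < (tll.headD "").toList.length)
instance (sl : List String) (tll : List String) : Decidable (Pre_check sl tll) := by
  unfold Pre_check; infer_instance

def pvWitness_check : List String × List String := (["#.", ".."], ["##"])

def Spec_check (sl : List String) (tll : List String) (out : Bool) : Prop := out = check_alt sl tll
instance (sl : List String) (tll : List String) (out : Bool) : Decidable (Spec_check sl tll out) := by unfold Spec_check; infer_instance

-- ===== CLAIM (what is proved, stated in full; the proofs are below) =====
def Claim_equal_check : Prop := ∀ (sl : List String) (tll : List String), Dom_check sl tll → Pre_check sl tll → Spec_check sl tll (check sl tll)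

-- ===== LEMMAS AND PROOFS =====

-- the blocked-pair list built inside check_alt (proof-side name for the same term)
def pvBL (S T : List (List Char)) (H W : Int) : List (Int × Int) :=
  (PySem.List.enumerate S).flatMap fun gyr =>
    (PySem.List.enumerate gyr.2).flatMap fun gxc =>
      if gxc.2 == '#' then
        (PySem.List.enumerate T).flatMap fun tyr =>
          (PySem.List.enumerate tyr.2).flatMap fun txc =>
            if txc.2 == '#' && decide (0 ≤ gyr.1 - tyr.1) && decide (gyr.1 - tyr.1 ≤ H) &&
               decide (0 ≤ gxc.1 - txc.1) && decide (gxc.1 - txc.1 ≤ W)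
            then [(gyr.1 - tyr.1, gxc.1 - txc.1)] else []
      else []

-- A's inner double loop as a Boolean "this placement is blocked" test
def pvBad (S T : List (List Char)) (tw : Int) (y x : Int) : Bool :=
  (PySem.List.pyRange 0 T.length 1).any fun i =>
    (PySem.List.pyRange 0 tw 1).any fun j =>
      (PySem.List.pyGetD (PySem.List.pyGetD T i []) j ' ' == '#') &&
      (PySem.List.pyGetD (PySem.List.pyGetD S (y + i) []) (x + j) ' ' == '#')

theorem pvFoldl_and {α : Type} (l : List α) (f : α → Bool) (b : Bool) :
    l.foldl (fun r i => r && f i) b = (b && l.all f) := by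
  induction l generalizing b with
  | nil => simp
  | cons c l ih => simp [ih, Bool.and_assoc]

theorem pvDoubleFold (l1 l2 : List Int) (P : Int → Int → Bool) :
    l1.foldl (fun res i =>
      l2.foldl (fun res j => if P i j then false else res) res) true
    = !(l1.any fun i => l2.any (P i)) := by
  have hfun : (fun (res : Bool) (i : Int) =>
      l2.foldl (fun res j => if P i j then false else res) res)
      = fun res i => res && !(l2.any (P i)) := by
    funext res i
    exact PySem.List.foldl_if_false_eq (P i) l2 res
  rw [hfun, pvFoldl_and, Bool.true_and]
  induction l1 with
  | nil => rfl
  | cons c l ih => simp [ih]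

-- check, rewritten as: some placement has no blocked cell
theorem pvA_char (sl tll : List String) :
    check sl tll =
      ((PySem.List.pyRange 0 (((sl.map String.toList).length : Int) -
          ((tll.map String.toList).length : Int) + 1) 1).any fun y =>
        (PySem.List.pyRange 0
            (((PySem.List.pyGetD (sl.map String.toList) 0 []).length : Int) -
             ((PySem.List.pyGetD (tll.map String.toList) 0 []).length : Int) + 1) 1).any fun x =>
          !pvBad (sl.map String.toList) (tll.map String.toList)
            ((PySem.List.pyGetD (tll.map String.toList) 0 []).length : Int) y x) := by
  unfold check pvBad
  refine PySem.List.any_congr_mem fun y _ => ?_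
  refine PySem.List.any_congr_mem fun x _ => ?_
  exact pvDoubleFold _ _ _

-- check_alt, rewritten through pvBL
theorem pvB_char (sl tll : List String) :
    check_alt sl tll =
      decide (((PySem.Set.ofList (pvBL (sl.map String.toList) (tll.map String.toList)
          (((sl.map String.toList).length : Int) - ((tll.map String.toList).length : Int))
          (((PySem.List.pyGetD (sl.map String.toList) 0 []).length : Int) -
           ((PySem.List.pyGetD (tll.map String.toList) 0 []).length : Int)))).length : Int) <
        max 0 ((((sl.map String.toList).length : Int) -
            ((tll.map String.toList).length : Int)) + 1) *
        max 0 ((((PySem.List.pyGetD (sl.map String.toList) 0 []).length : Int) -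
            ((PySem.List.pyGetD (tll.map String.toList) 0 []).length : Int)) + 1)) := rfl

-- membership in the blocked list, unfolded
theorem pvBL_mem (S T : List (List Char)) (H W : Int) (p : Int × Int) :
    p ∈ pvBL S T H W ↔
      ∃ gy : Nat, gy < S.length ∧ ∃ gx : Nat, gx < (S.getD gy []).length ∧
        (S.getD gy []).getD gx ' ' = '#' ∧
        ∃ ty : Nat, ty < T.length ∧ ∃ tx : Nat, tx < (T.getD ty []).length ∧
          (T.getD ty []).getD tx ' ' = '#' ∧
          0 ≤ (gy : Int) - ty ∧ (gy : Int) - ty ≤ H ∧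
          0 ≤ (gx : Int) - tx ∧ (gx : Int) - tx ≤ W ∧
          p = ((gy : Int) - ty, (gx : Int) - tx) := by
  unfold pvBL
  simp only [List.mem_flatMap, List.mem_ite_nil_right, PySem.List.mem_enumerate_iff,
    List.mem_singleton, beq_iff_eq, Bool.and_eq_true, decide_eq_true_eq]
  constructor
  · rintro ⟨gyr, ⟨gy, hgy, rfl⟩, gxc, ⟨gx, hgx, rfl⟩, hch, tyr, ⟨ty, hty, rfl⟩,
      txc, ⟨tx, htx, rfl⟩, ⟨⟨⟨⟨htch, c1⟩, c2⟩, c3⟩, c4⟩, rfl⟩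
    simp only [zero_add] at *
    exact ⟨gy, hgy, gx, by rw [List.getD_eq_getElem _ _ hgy]; exact hgx,
      by rw [List.getD_eq_getElem _ _ hgy, List.getD_eq_getElem _ _ hgx]; exact hch,
      ty, hty, tx, by rw [List.getD_eq_getElem _ _ hty]; exact htx,
      by rw [List.getD_eq_getElem _ _ hty, List.getD_eq_getElem _ _ htx]; exact htch,
      c1, c2, c3, c4, rfl⟩
  · rintro ⟨gy, hgy, gx, hgx, hch, ty, hty, tx, htx, htch, c1, c2, c3, c4, rfl⟩
    rw [List.getD_eq_getElem _ _ hgy] at hgx hch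
    rw [List.getD_eq_getElem _ _ hty] at htx htch
    rw [List.getD_eq_getElem _ _ hgx] at hch
    rw [List.getD_eq_getElem _ _ htx] at htch
    exact ⟨(gy, S[gy]), ⟨gy, hgy, by simp⟩, (gx, S[gy][gx]), ⟨gx, hgx, by simp⟩, hch,
      (ty, T[ty]), ⟨ty, hty, by simp⟩, (tx, T[ty][tx]), ⟨tx, htx, by simp⟩,
      ⟨⟨⟨⟨htch, by simpa using c1⟩, by simpa using c2⟩, by simpa using c3⟩, by simpa using c4⟩,
      by simp⟩

-- every blocked pair is a placement window
theorem pvBL_bounds (S T : List (List Char)) (H W : Int) (p : Int × Int)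
    (hp : p ∈ pvBL S T H W) : 0 ≤ p.1 ∧ p.1 ≤ H ∧ 0 ≤ p.2 ∧ p.2 ≤ W := by
  rw [pvBL_mem] at hp
  obtain ⟨gy, _, gx, _, _, ty, _, tx, _, _, h1, h2, h3, h4, rfl⟩ := hp
  exact ⟨h1, h2, h3, h4⟩

-- inside a placement window of a rectangular pair, membership in pvBL agrees with pvBad
theorem pvBL_iff_bad (S T : List (List Char)) (w tw : Nat)
    (hrowS : ∀ r ∈ S, r.length = w) (hrowT : ∀ r ∈ T, r.length = tw)
    (y x : Int) (hy0 : 0 ≤ y) (hyH : y ≤ (S.length : Int) - T.length)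
    (hx0 : 0 ≤ x) (hxW : x ≤ (w : Int) - tw) :
    (y, x) ∈ pvBL S T ((S.length : Int) - T.length) ((w : Int) - tw) ↔
      pvBad S T tw y x = true := by
  rw [pvBL_mem]
  unfold pvBad
  simp only [List.any_eq_true, PySem.List.mem_pyRange_one]
  constructor
  · rintro ⟨gy, hgy, gx, hgx, hch, ty, hty, tx, htx, htch, c1, c2, c3, c4, heq⟩
    rw [Prod.mk.injEq] at heq
    obtain ⟨hy, hx⟩ := heq
    have hrT : (T.getD ty []).length = tw := hrowT _ (by
      rw [List.getD_eq_getElem _ _ hty]; exact List.getElem_mem _)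
    refine ⟨(ty : Int), ⟨by omega, by exact_mod_cast hty⟩,
            (tx : Int), ⟨by omega, by rw [hrT] at htx; exact_mod_cast htx⟩, ?_⟩
    have e1 : y + (ty : Int) = (gy : Int) := by omega
    have e2 : x + (tx : Int) = (gx : Int) := by omega
    rw [PySem.List.pyGetD_natCast T ty, PySem.List.pyGetD_natCast _ tx,
        e1, e2, PySem.List.pyGetD_natCast S gy, PySem.List.pyGetD_natCast _ gx]
    rw [Bool.and_eq_true, beq_iff_eq, beq_iff_eq]; exact ⟨htch, hch⟩
  · rintro ⟨i, ⟨hi0, hiT⟩, j, ⟨hj0, hjw⟩, hand⟩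
    rw [Bool.and_eq_true, beq_iff_eq, beq_iff_eq] at hand
    obtain ⟨htch, hch⟩ := hand
    have ei : ((i.toNat : Nat) : Int) = i := Int.toNat_of_nonneg hi0
    have ej : ((j.toNat : Nat) : Int) = j := Int.toNat_of_nonneg hj0
    have hgy : (y + i).toNat < S.length := by omega
    have hgx0 : 0 ≤ x + j := by omega
    have egy : ((y + i).toNat : Int) = y + i := Int.toNat_of_nonneg (by omega)
    have egx : ((x + j).toNat : Int) = x + j := Int.toNat_of_nonneg hgx0
    have hrS : (S.getD (y + i).toNat []).length = w := hrowS _ (by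
      rw [List.getD_eq_getElem _ _ hgy]; exact List.getElem_mem _)
    have htyT : i.toNat < T.length := by omega
    have hrT : (T.getD i.toNat []).length = tw := hrowT _ (by
      rw [List.getD_eq_getElem _ _ htyT]; exact List.getElem_mem _)
    refine ⟨(y + i).toNat, hgy, (x + j).toNat, by rw [hrS]; omega, ?_,
            i.toNat, htyT, j.toNat, by rw [hrT]; omega, ?_, ?_, ?_, ?_, ?_, ?_⟩
    · rw [← egx] at hch; rw [← PySem.List.pyGetD_natCast _ (x+j).toNat ' ']
      rw [← egy] at hch; rw [← PySem.List.pyGetD_natCast S (y+i).toNat []]; exact hch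
    · rw [← ej] at htch; rw [← PySem.List.pyGetD_natCast _ j.toNat ' ']
      rw [← ei] at htch; rw [← PySem.List.pyGetD_natCast T i.toNat []]; exact htch
    · omega
    · omega
    · omega
    · omega
    · rw [Prod.mk.injEq]; constructor <;> omega

-- counting: a nodup sublist of a nodup list is shorter iff something is missing
theorem pvCount {α : Type} [DecidableEq α] (S P : List α) (hS : S.Nodup) (hP : P.Nodup)
    (hsub : ∀ a ∈ S, a ∈ P) : (S.length < P.length ↔ ∃ p ∈ P, p ∉ S) := by
  rw [← List.toFinset_card_of_nodup hS, ← List.toFinset_card_of_nodup hP]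
  have hfs : S.toFinset ⊆ P.toFinset := by
    intro a ha; rw [List.mem_toFinset] at *; exact hsub a ha
  constructor
  · intro hlt
    have : S.toFinset ⊂ P.toFinset := by
      refine Finset.ssubset_iff_subset_ne.mpr ⟨hfs, ?_⟩
      intro he; rw [he] at hlt; omega
    obtain ⟨p, hpP, hpS⟩ := (Finset.ssubset_iff_of_subset hfs).mp this
    exact ⟨p, List.mem_toFinset.mp hpP, fun h => hpS (List.mem_toFinset.mpr h)⟩
  · intro ⟨p, hpP, hpS⟩
    exact Finset.card_lt_card ((Finset.ssubset_iff_of_subset hfs).mpr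
      ⟨p, List.mem_toFinset.mpr hpP, fun h => hpS (List.mem_toFinset.mp h)⟩)

-- ===== VERDICT =====
theorem check_spec : Claim_equal_check := by
  intro sl tll _ hpre
  obtain ⟨h1, h2, h34⟩ := hpre
  obtain ⟨s0, srest, rfl⟩ := List.exists_cons_of_ne_nil h1
  obtain ⟨t0, trest, rfl⟩ := List.exists_cons_of_ne_nil h2
  simp only [List.headD_cons] at h34
  unfold Spec_check
  rw [pvA_char, pvB_char]
  simp only [List.map_cons, PySem.List.pyGetD_zero_cons]
  set S : List (List Char) := s0.toList :: List.map String.toList srest with hSdef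
  set T : List (List Char) := t0.toList :: List.map String.toList trest with hTdef
  set w : Nat := s0.toList.length with hwdef
  set tw : Nat := t0.toList.length with htwdef
  set H : Int := (S.length : Int) - (T.length : Int) with hHdef
  set W : Int := (w : Int) - (tw : Int) with hWdef
  by_cases hdeg : S.length < T.length ∨ w < tw
  · -- no placement window: both sides are false
    have hBf : decide (((PySem.Set.ofList (pvBL S T H W)).length : Int) <
        max 0 (H + 1) * max 0 (W + 1)) = false := by
      rw [decide_eq_false_iff_not]
      rcases hdeg with hd | hd
      · have : max 0 (H + 1) = 0 := by rw [hHdef]; omega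
        rw [this, zero_mul]; intro hlt; omega
      · have : max 0 (W + 1) = 0 := by rw [hWdef]; omega
        rw [this, mul_zero]; intro hlt; omega
    rw [hBf]
    rcases hdeg with hd | hd
    · rw [PySem.List.pyRange_one_eq_nil (by omega : H + 1 ≤ 0)]; rfl
    · rw [PySem.List.pyRange_one_eq_nil (by omega : W + 1 ≤ 0)]
      simp
  · -- the rectangular case with at least one window
    have hth : T.length ≤ S.length := by omega
    have htww : tw ≤ w := by omega
    have hH0 : 0 ≤ H := by rw [hHdef]; omega
    have hW0 : 0 ≤ W := by rw [hWdef]; omega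
    have hrect : (∀ s ∈ s0 :: srest, s.toList.length = w) ∧
                 (∀ s ∈ t0 :: trest, s.toList.length = tw) := by
      rcases h34 with h34 | h34 | h34
      · exact h34
      · exfalso; simp only [hSdef, hTdef, List.length_cons, List.length_map] at hth
        simp only [List.length_cons] at h34; omega
      · omega
    have hrowS : ∀ r ∈ S, r.length = w := by
      intro r hr
      rw [hSdef] at hr
      rcases List.mem_cons.mp hr with rfl | hr
      · rfl
      · obtain ⟨s, hs, rfl⟩ := List.mem_map.mp hr
        exact hrect.1 s (List.mem_cons_of_mem _ hs)
    have hrowT : ∀ r ∈ T, r.length = tw := by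
      intro r hr
      rw [hTdef] at hr
      rcases List.mem_cons.mp hr with rfl | hr
      · rfl
      · obtain ⟨s, hs, rfl⟩ := List.mem_map.mp hr
        exact hrect.2 s (List.mem_cons_of_mem _ hs)
    -- the placement-window list
    set PL : List (Int × Int) :=
      PySem.List.pyRange 0 (H + 1) 1 ×ˢ PySem.List.pyRange 0 (W + 1) 1 with hPLdef
    have hmemPL : ∀ p : Int × Int, p ∈ PL ↔ (0 ≤ p.1 ∧ p.1 ≤ H ∧ 0 ≤ p.2 ∧ p.2 ≤ W) := by
      rintro ⟨p1, p2⟩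
      rw [hPLdef, List.mem_product, PySem.List.mem_pyRange_one, PySem.List.mem_pyRange_one]
      constructor <;> (intro h; constructor <;> try constructor) <;> omega
    have hsub : ∀ a ∈ PySem.Set.ofList (pvBL S T H W), a ∈ PL := by
      intro a ha
      rw [PySem.Set.mem_ofList] at ha
      have := pvBL_bounds S T H W a ha
      rw [hmemPL]; exact this
    have hlenPL : PL.length = (H + 1).toNat * (W + 1).toNat := by
      rw [hPLdef, List.length_product, PySem.List.length_pyRange_one,
          PySem.List.length_pyRange_one, sub_zero, sub_zero]
    have hnodupPL : PL.Nodup :=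
      List.Nodup.product (PySem.List.nodup_pyRange_one _ _) (PySem.List.nodup_pyRange_one _ _)
    have hcount := pvCount (PySem.Set.ofList (pvBL S T H W)) PL
      (PySem.Set.nodup_ofList _) hnodupPL hsub
    rw [Bool.eq_iff_iff, decide_eq_true_iff]
    have hmax1 : max 0 (H + 1) = H + 1 := by omega
    have hmax2 : max 0 (W + 1) = W + 1 := by omega
    rw [hmax1, hmax2]
    have hBiff : (((PySem.Set.ofList (pvBL S T H W)).length : Int) < (H + 1) * (W + 1)) ↔
        ∃ p ∈ PL, p ∉ PySem.Set.ofList (pvBL S T H W) := by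
      rw [← hcount, hlenPL]
      have e : ((H + 1).toNat * (W + 1).toNat : Int) = (H + 1) * (W + 1) := by
        rw [Int.toNat_of_nonneg (by omega), Int.toNat_of_nonneg (by omega)]
      omega
    rw [hBiff]
    simp only [List.any_eq_true, Bool.not_eq_true']
    constructor
    · rintro ⟨y, hy, x, hx, hbad⟩
      rw [PySem.List.mem_pyRange_one] at hy hx
      refine ⟨(y, x), (hmemPL (y, x)).mpr ⟨by omega, by omega, by omega, by omega⟩, ?_⟩
      rw [PySem.Set.mem_ofList]
      intro hmem
      rw [pvBL_iff_bad S T w tw hrowS hrowT y x (by omega) (by omega) (by omega) (by omega)]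
        at hmem
      rw [hmem] at hbad
      exact absurd hbad (by simp)
    · rintro ⟨⟨y, x⟩, hpPL, hpB⟩
      rw [hmemPL] at hpPL
      obtain ⟨b1, b2, b3, b4⟩ := hpPL
      rw [PySem.Set.mem_ofList] at hpB
      refine ⟨y, PySem.List.mem_pyRange_one.mpr ⟨by omega, by omega⟩,
              x, PySem.List.mem_pyRange_one.mpr ⟨by omega, by omega⟩, ?_⟩
      rw [← Bool.not_eq_true]
      intro hbad
      exact hpB ((pvBL_iff_bad S T w tw hrowS hrowT y x b1 b2 b3 b4).mpr hbad)
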